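-- pv_equiv track=rewrite | github.com/yflau/dsapp | dsapp/greedy.py | dp_activity_selector
-- ===== SOURCE A (Python) =====
-- def dp_activity_selector(S, F):
--     """
--     Activity selector problem with dynamic programming method, maybe it's
--     different from the method of the book.
--
--     f(0) = 1
--     f(1) = max(f(0), f(0)+1)   if 0 is compatible with 1
--            max(f(0))           if 1 is not compatibl with 2
--     f(i) = max(f(i-1), f(j)+1) with 0 <= j < i, and j is compatible with i
--
--     f(i) stands for the max compatible number of the first i activities.
--
--     Notice: The recursive formula established based on the F is sorted
--     in ascending order, for if i is compatible with j, then i is compatible with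
--     all 0 <= k < j activities.
--
--     >>> S = [1, 3, 0, 5, 3, 5,  6,  8,  8,  2, 12]
--     >>> F = [4, 5, 6, 7, 8, 9, 10, 11, 12, 13, 14]
--     >>> DP, R = dp_activity_selector(S, F)
--     >>> DP
--     [1, 1, 1, 2, 2, 2, 2, 3, 3, 3, 4]
--     >>> R
--     [(1, 4), (5, 7), (8, 11), (12, 14)]
--     >>> max(DP)
--     4
--     >>> len(R)
--     4
--     >>> S = [ 6, 8,  0, 12, 3, 5, 1, 3,  8,  2, 5]
--     >>> F = [10, 11, 6, 14, 8, 9, 4, 5, 12, 13, 7]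
--     >>> DP, R = dp_activity_selector(S, F)
--     >>> R
--     [(1, 4), (5, 7), (8, 11), (12, 14)]
--     """
--     S, F = zip(*sorted(zip(S, F), key=lambda e:e[1]))   # ensure F in ascending order
--
--     n = len(S)
--     DP = [1 for i in range(n)]
--     R = [(S[0], F[0])]
--
--     for i in range(1, n):
--         DP[i] = max(DP[:i])
--         for j in range(i):
--             if F[j] <= S[i] and DP[j] + 1 > DP[i]:
--                 DP[i] = DP[j] + 1
--                 R.append((S[i], F[i]))
--
--     return DP, R
-- ===== SOURCE B (Python) =====
-- def dp_activity_selector(S, F):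
--     # One linear pass after the sort: since F is ascending and DP is
--     # nondecreasing, A's inner scan reduces to comparing S[i] with the finish
--     # time of the FIRST activity achieving the current maximum count.
--     pairs = sorted(zip(S, F), key=lambda e: e[1])
--     s0, f0 = pairs[0]
--     DP = [1]
--     R = [(s0, f0)]
--     cur = 1
--     ft = f0  # finish time of the first activity whose DP value equals cur
--     for s, f in pairs[1:]:
--         if ft <= s:
--             cur += 1
--             ft = f
--             R.append((s, f))
--         DP.append(cur)
--     return DP, R
-- ===== Notes on version B (the rewrite author's own statement) =====
-- stated objective: faster
-- what changed: B replaces A's O(n^2) per-index prefix-max recomputation and inner compatibility scan by a single linear pass after the sort, maintaining the running maximum count and the finish time of the first activity that attains it.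
import Mathlib
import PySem

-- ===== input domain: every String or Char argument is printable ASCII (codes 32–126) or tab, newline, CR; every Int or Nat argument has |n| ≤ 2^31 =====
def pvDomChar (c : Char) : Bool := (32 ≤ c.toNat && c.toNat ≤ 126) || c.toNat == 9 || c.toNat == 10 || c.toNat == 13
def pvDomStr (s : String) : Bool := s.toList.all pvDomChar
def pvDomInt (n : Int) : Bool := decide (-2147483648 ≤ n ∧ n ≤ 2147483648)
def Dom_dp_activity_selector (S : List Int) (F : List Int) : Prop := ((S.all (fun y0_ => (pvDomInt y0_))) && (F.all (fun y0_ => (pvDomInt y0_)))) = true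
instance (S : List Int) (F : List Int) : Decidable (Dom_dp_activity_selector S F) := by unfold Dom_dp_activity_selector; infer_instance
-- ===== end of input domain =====

-- B replaces A's quadratic prefix-max + inner compatibility scan by one linear pass
-- after the sort (objective: faster).


-- ===== PORT A =====
-- body of A's inner `for j in range(i)` loop (st = (DP, R))
def pvInnerF (Ss Fs : List Int) (i : Nat) (st : List Int × List (Int × Int)) (j : Nat) :
    List Int × List (Int × Int) :=
  if Fs.getD j 0 ≤ Ss.getD i 0 ∧ st.1.getD j 0 + 1 > st.1.getD i 0 then
    (st.1.set i (st.1.getD j 0 + 1), st.2 ++ [(Ss.getD i 0, Fs.getD i 0)])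
  else st

-- body of A's `for i in range(1, n)` loop: `DP[i] = max(DP[:i])`, then the inner scan
-- (`max` of the nonempty slice; the .getD 0 default is never used when 1 ≤ i)
def pvAStep (Ss Fs : List Int) (st : List Int × List (Int × Int)) (i : Nat) :
    List Int × List (Int × Int) :=
  (List.range i).foldl (pvInnerF Ss Fs i)
    (st.1.set i ((PySem.List.max? (st.1.take i) (fun x => x)).getD 0), st.2)

def dp_activity_selector (S : List Int) (F : List Int) : List Int × (List (Int × Int)) :=
  let pairs := PySem.List.sorted (List.zip S F) (fun e => e.2)  -- sorted(zip(S,F), key=e[1])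
  let Ss := pairs.map Prod.fst
  let Fs := pairs.map Prod.snd
  let n := Ss.length
  -- S[0]/F[0] are in range on every input Pre_ admits (n ≥ 1 there)
  (List.range' 1 (n - 1)).foldl (pvAStep Ss Fs)
    (List.replicate n (1 : Int), [(Ss.getD 0 0, Fs.getD 0 0)])

-- ===== PORT B =====
-- body of B's single pass; state = ((DP, R), cur, ft)
def pvStepB (st : (List Int × List (Int × Int)) × Int × Int) (p : Int × Int) :
    (List Int × List (Int × Int)) × Int × Int :=
  if st.2.2 ≤ p.1 then ((st.1.1 ++ [st.2.1 + 1], st.1.2 ++ [p]), st.2.1 + 1, p.2)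
  else ((st.1.1 ++ [st.2.1], st.1.2), st.2.1, st.2.2)

def dp_activity_selector_alt (S : List Int) (F : List Int) : List Int × (List (Int × Int)) :=
  match PySem.List.sorted (List.zip S F) (fun e => e.2) with
  | [] => ([], [])  -- Python B raises IndexError at pairs[0] here; outside Pre_
  | (s0, f0) :: rest => (rest.foldl pvStepB (([1], [(s0, f0)]), 1, f0)).1

-- ===== PRECONDITION & SPEC =====
-- Pre_ excludes exactly the inputs where A raises: an empty S or F makes the
-- unpacking `S, F = zip(*sorted(zip(S, F), ...))` raise ValueError.
def Pre_dp_activity_selector (S : List Int) (F : List Int) : Prop := S ≠ [] ∧ F ≠ []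
instance (S : List Int) (F : List Int) : Decidable (Pre_dp_activity_selector S F) := by unfold Pre_dp_activity_selector; infer_instance

def pvWitness_dp_activity_selector : List Int × List Int := ([1, 3, 0], [4, 5, 6])

def Spec_dp_activity_selector (S : List Int) (F : List Int) (out : List Int × (List (Int × Int))) : Prop := out = dp_activity_selector_alt S F
instance (S : List Int) (F : List Int) (out : List Int × (List (Int × Int))) : Decidable (Spec_dp_activity_selector S F out) := by unfold Spec_dp_activity_selector; infer_instance

-- ===== CLAIM (what is proved, stated in full; the proofs are below) =====
def Claim_equal_dp_activity_selector : Prop := ∀ (S : List Int) (F : List Int), Dom_dp_activity_selector S F → Pre_dp_activity_selector S F → Spec_dp_activity_selector S F (dp_activity_selector S F)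

-- ===== LEMMAS AND PROOFS =====

-- A's inner scan leaves the state unchanged when no j in js triggers an update
theorem pv_inner_id (Ss Fs : List Int) (i : Nat) (DP : List Int) (R : List (Int × Int))
    (js : List Nat)
    (h : ∀ j ∈ js, ¬(Fs.getD j 0 ≤ Ss.getD i 0 ∧ DP.getD j 0 + 1 > DP.getD i 0)) :
    js.foldl (pvInnerF Ss Fs i) (DP, R) = (DP, R) := by
  induction js with
  | nil => rfl
  | cons a t ih =>
    have ha := h a (List.mem_cons_self)
    simp only [List.foldl_cons, pvInnerF, if_neg ha]
    exact ih (fun j hj => h j (List.mem_cons_of_mem _ hj))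

-- the loop invariant tying A's state after i = 1..k to B's state after k steps
theorem pv_invariant (s0 f0 : Int) (rest : List (Int × Int))
    (hF : ∀ p q : Nat, p ≤ q → q < rest.length + 1 →
      (((s0, f0) :: rest).map Prod.snd).getD p 0 ≤ (((s0, f0) :: rest).map Prod.snd).getD q 0)
    (k : Nat) (hk : k ≤ rest.length) :
    (((List.range' 1 k).foldl
        (pvAStep (((s0, f0) :: rest).map Prod.fst) (((s0, f0) :: rest).map Prod.snd))
        (List.replicate (rest.length + 1) (1 : Int), [(s0, f0)])).1 =
      ((rest.take k).foldl pvStepB (([1], [(s0, f0)]), 1, f0)).1.1 ++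
        List.replicate (rest.length - k) (1 : Int))
    ∧ (((List.range' 1 k).foldl
        (pvAStep (((s0, f0) :: rest).map Prod.fst) (((s0, f0) :: rest).map Prod.snd))
        (List.replicate (rest.length + 1) (1 : Int), [(s0, f0)])).2 =
      ((rest.take k).foldl pvStepB (([1], [(s0, f0)]), 1, f0)).1.2)
    ∧ ((rest.take k).foldl pvStepB (([1], [(s0, f0)]), 1, f0)).1.1.length = k + 1
    ∧ (∀ j1 j2 : Nat, j1 ≤ j2 → j2 ≤ k →
        ((rest.take k).foldl pvStepB (([1], [(s0, f0)]), 1, f0)).1.1.getD j1 0 ≤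
        ((rest.take k).foldl pvStepB (([1], [(s0, f0)]), 1, f0)).1.1.getD j2 0)
    ∧ ((rest.take k).foldl pvStepB (([1], [(s0, f0)]), 1, f0)).1.1.getD k 0 =
        ((rest.take k).foldl pvStepB (([1], [(s0, f0)]), 1, f0)).2.1
    ∧ ∃ t : Nat, t ≤ k
        ∧ ((rest.take k).foldl pvStepB (([1], [(s0, f0)]), 1, f0)).1.1.getD t 0 =
            ((rest.take k).foldl pvStepB (([1], [(s0, f0)]), 1, f0)).2.1
        ∧ ((((s0, f0) :: rest).map Prod.snd).getD t 0 =
            ((rest.take k).foldl pvStepB (([1], [(s0, f0)]), 1, f0)).2.2)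
        ∧ ∀ j < t, ((rest.take k).foldl pvStepB (([1], [(s0, f0)]), 1, f0)).1.1.getD j 0 <
            ((rest.take k).foldl pvStepB (([1], [(s0, f0)]), 1, f0)).2.1 := by
  revert hk
  induction k with
  | zero =>
    intro _
    refine ⟨by simp [List.replicate_succ], rfl, rfl, ?_, rfl, 0, le_refl 0, rfl, rfl, by omega⟩
    intro j1 j2 h1 h2
    have e1 : j1 = 0 := by omega
    have e2 : j2 = 0 := by omega
    subst e1; subst e2; exact le_refl _
  | succ k ih =>
    intro hk1
    have hklt : k < rest.length := hk1
    obtain ⟨P1, P2, P3, P4, P5, t, ht, Pt1, Pt2, Pt3⟩ := ih (Nat.le_of_succ_le hk1)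
    set Ss := ((s0, f0) :: rest).map Prod.fst with hSs
    set Fs := ((s0, f0) :: rest).map Prod.snd with hFs
    set stA := (List.range' 1 k).foldl (pvAStep Ss Fs)
        (List.replicate (rest.length + 1) (1 : Int), [(s0, f0)]) with hstA
    set stB := (rest.take k).foldl pvStepB (([1], [(s0, f0)]), 1, f0) with hstB
    -- expose the (k+1)-st step on both sides
    have hA1 : List.range' 1 (k + 1) = List.range' 1 k ++ [k + 1] := by
      have h11 : 1 + 1 * k = k + 1 := by omega
      rw [List.range'_concat, h11]
    have hB1 : rest.take (k + 1) = rest.take k ++ [rest[k]'hklt] := by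
      rw [List.take_add_one, List.getElem?_eq_getElem hklt]; rfl
    rw [hA1, hB1, List.foldl_append, List.foldl_append, ← hstA, ← hstB]
    simp only [List.foldl_cons, List.foldl_nil]
    -- basic facts
    have hs : Ss.getD (k + 1) 0 = (rest[k]'hklt).1 := by
      rw [hSs, List.getD_eq_getElem _ _ (by simp; omega)]; simp
    have hf : Fs.getD (k + 1) 0 = (rest[k]'hklt).2 := by
      rw [hFs, List.getD_eq_getElem _ _ (by simp; omega)]; simp
    have hble : ∀ j, j ≤ k → stB.1.1.getD j 0 ≤ stB.2.1 := by
      intro j hj; exact P5 ▸ P4 j k hj (le_refl k)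
    -- A's `DP[i] = max(DP[:i])` step
    have htake : (stB.1.1 ++ List.replicate (rest.length - k) (1 : Int)).take (k + 1) = stB.1.1 := by
      rw [← P3, List.take_left]
    have hmax : (PySem.List.max? stB.1.1 (fun x => x)).getD 0 = stB.2.1 := by
      cases hm : PySem.List.max? stB.1.1 (fun x => x) with
      | none =>
        rw [PySem.List.max?_eq_none_iff] at hm
        rw [hm] at P3; simp at P3
      | some m =>
        have hcmem : stB.1.1.getD k 0 ∈ stB.1.1 := by
          rw [List.getD_eq_getElem _ _ (by omega)]; exact List.getElem_mem _
        have h1 : stB.1.1.getD k 0 ≤ m := PySem.List.max?_isMax hm _ hcmem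
        obtain ⟨j, hj, hjm⟩ := List.getElem_of_mem (PySem.List.max?_mem hm)
        have h2 : m ≤ stB.1.1.getD k 0 := by
          rw [← hjm, ← List.getD_eq_getElem _ 0 hj]
          exact P4 j k (by omega) (le_refl k)
        simp only [Option.getD_some]
        omega
    have hset : (stB.1.1 ++ List.replicate (rest.length - k) (1 : Int)).set (k + 1) stB.2.1
        = stB.1.1 ++ stB.2.1 :: List.replicate (rest.length - (k + 1)) (1 : Int) := by
      rw [List.set_append, if_neg (by omega)]
      congr 1
      rw [P3, Nat.sub_self,
        show rest.length - k = (rest.length - (k + 1)) + 1 from by omega,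
        List.replicate_succ, List.set_cons_zero]
    simp only [pvAStep]
    rw [P1, P2, htake, hmax, hset]
    -- getD facts on the intermediate DP
    have hD0i : (stB.1.1 ++ stB.2.1 :: List.replicate (rest.length - (k + 1)) (1 : Int)).getD (k + 1) 0
        = stB.2.1 := by
      rw [List.getD_append_right _ _ _ _ (by omega), P3, Nat.sub_self]; rfl
    have hD0j : ∀ j, j ≤ k →
        (stB.1.1 ++ stB.2.1 :: List.replicate (rest.length - (k + 1)) (1 : Int)).getD j 0
        = stB.1.1.getD j 0 := by
      intro j hj; exact List.getD_append _ _ _ _ (by omega)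
    by_cases hc : stB.2.2 ≤ (rest[k]'hklt).1
    · -- compatible: A's inner scan fires exactly once, at index t
      have hsplit : List.range (k + 1) = List.range t ++ t :: List.range' (t + 1) (k - t) := by
        have h0 := List.range'_append (s := 0) (m := t) (n := (k - t) + 1) (step := 1)
        simp only [Nat.one_mul, Nat.zero_add] at h0
        rw [List.range_eq_range', show k + 1 = t + ((k - t) + 1) from by omega, ← h0,
          List.range'_succ, List.range_eq_range']
      rw [hsplit, List.foldl_append]
      -- before t: DP[j] < cur, so `DP[j] + 1 > DP[i]` fails
      have hid1 : (List.range t).foldl (pvInnerF Ss Fs (k + 1))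
          (stB.1.1 ++ stB.2.1 :: List.replicate (rest.length - (k + 1)) (1 : Int), stB.1.2)
          = (stB.1.1 ++ stB.2.1 :: List.replicate (rest.length - (k + 1)) (1 : Int), stB.1.2) := by
        apply pv_inner_id
        intro j hj
        rw [List.mem_range] at hj
        rw [hD0i, hD0j j (by omega)]
        have := Pt3 j hj
        intro hcon; omega
      rw [hid1, List.foldl_cons]
      -- at t: the update fires
      have hset2 : (stB.1.1 ++ stB.2.1 :: List.replicate (rest.length - (k + 1)) (1 : Int)).set (k + 1) (stB.2.1 + 1)
          = stB.1.1 ++ (stB.2.1 + 1) :: List.replicate (rest.length - (k + 1)) (1 : Int) := by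
        rw [List.set_append, if_neg (by omega), P3, Nat.sub_self, List.set_cons_zero]
      have hstep : pvInnerF Ss Fs (k + 1)
          (stB.1.1 ++ stB.2.1 :: List.replicate (rest.length - (k + 1)) (1 : Int), stB.1.2) t
          = (stB.1.1 ++ (stB.2.1 + 1) :: List.replicate (rest.length - (k + 1)) (1 : Int),
             stB.1.2 ++ [(Ss.getD (k + 1) 0, Fs.getD (k + 1) 0)]) := by
        have hcond1 : Fs.getD t 0 ≤ Ss.getD (k + 1) 0 := by rw [Pt2, hs]; exact hc
        have hcond2 : (stB.1.1 ++ stB.2.1 :: List.replicate (rest.length - (k + 1)) (1 : Int)).getD t 0 + 1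
            > (stB.1.1 ++ stB.2.1 :: List.replicate (rest.length - (k + 1)) (1 : Int)).getD (k + 1) 0 := by
          rw [hD0i, hD0j t ht, Pt1]; omega
        simp only [pvInnerF, if_pos (And.intro hcond1 hcond2)]
        rw [hD0j t ht, Pt1, hset2]
      rw [hstep]
      -- after t: DP[i] is now cur + 1, nothing else fires
      have hid2 : (List.range' (t + 1) (k - t)).foldl (pvInnerF Ss Fs (k + 1))
          (stB.1.1 ++ (stB.2.1 + 1) :: List.replicate (rest.length - (k + 1)) (1 : Int),
           stB.1.2 ++ [(Ss.getD (k + 1) 0, Fs.getD (k + 1) 0)])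
          = (stB.1.1 ++ (stB.2.1 + 1) :: List.replicate (rest.length - (k + 1)) (1 : Int),
             stB.1.2 ++ [(Ss.getD (k + 1) 0, Fs.getD (k + 1) 0)]) := by
        apply pv_inner_id
        intro j hj
        rw [List.mem_range'_1] at hj
        have hD1i : (stB.1.1 ++ (stB.2.1 + 1) :: List.replicate (rest.length - (k + 1)) (1 : Int)).getD (k + 1) 0
            = stB.2.1 + 1 := by
          rw [List.getD_append_right _ _ _ _ (by omega), P3, Nat.sub_self]; rfl
        have hD1j : (stB.1.1 ++ (stB.2.1 + 1) :: List.replicate (rest.length - (k + 1)) (1 : Int)).getD j 0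
            = stB.1.1.getD j 0 := List.getD_append _ _ _ _ (by omega)
        rw [hD1i, hD1j]
        have := hble j (by omega)
        intro hcon; omega
      rw [hid2]
      -- B's step takes the true branch
      simp only [pvStepB, if_pos hc]
      have hrk : ((Ss.getD (k + 1) 0, Fs.getD (k + 1) 0) : Int × Int) = rest[k]'hklt := by
        rw [hs, hf]
      refine ⟨?_, by rw [hrk], by simp [P3], ?_, ?_, k + 1, le_refl _, ?_, by rw [hf], ?_⟩
      · simp [List.append_assoc]
      · -- monotone
        intro j1 j2 h12 h2
        have hg : ∀ j, j ≤ k → (stB.1.1 ++ [stB.2.1 + 1]).getD j 0 = stB.1.1.getD j 0 :=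
          fun j hj => List.getD_append _ _ _ _ (by omega)
        have hg2 : (stB.1.1 ++ [stB.2.1 + 1]).getD (k + 1) 0 = stB.2.1 + 1 := by
          rw [List.getD_append_right _ _ _ _ (by omega), P3, Nat.sub_self]; rfl
        rcases Nat.lt_or_ge j2 (k + 1) with h | h
        · rw [hg j1 (by omega), hg j2 (by omega)]; exact P4 j1 j2 h12 (by omega)
        · have hj2 : j2 = k + 1 := by omega
          rcases Nat.lt_or_ge j1 (k + 1) with h' | h'
          · rw [hg j1 (by omega), hj2, hg2]
            have := hble j1 (by omega); omega
          · have he : j1 = k + 1 := by omega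
            rw [he, hj2]
      · rw [List.getD_append_right _ _ _ _ (by omega), P3, Nat.sub_self]; rfl
      · rw [List.getD_append_right _ _ _ _ (by omega), P3, Nat.sub_self]; rfl
      · intro j hj
        rw [List.getD_append _ _ _ _ (by omega)]
        have := hble j (by omega); omega
    · -- incompatible: nothing fires at all
      have hid : (List.range (k + 1)).foldl (pvInnerF Ss Fs (k + 1))
          (stB.1.1 ++ stB.2.1 :: List.replicate (rest.length - (k + 1)) (1 : Int), stB.1.2)
          = (stB.1.1 ++ stB.2.1 :: List.replicate (rest.length - (k + 1)) (1 : Int), stB.1.2) := by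
        apply pv_inner_id
        intro j hj
        rw [List.mem_range] at hj
        rw [hD0i, hD0j j (by omega)]
        rintro ⟨hja, hjb⟩
        have h1 := hble j (by omega)
        have h2 : stB.1.1.getD j 0 = stB.2.1 := by omega
        have hjt : t ≤ j := by
          by_contra hlt
          have := Pt3 j (by omega)
          omega
        have h3 := hF t j hjt (by omega)
        rw [Pt2] at h3
        rw [hs] at hja
        exact hc (le_trans h3 hja)
      rw [hid]
      simp only [pvStepB, if_neg hc]
      refine ⟨?_, by trivial, by simp [P3], ?_, ?_, t, by omega, ?_, Pt2, ?_⟩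
      · simp [List.append_assoc]
      · intro j1 j2 h12 h2
        have hg : ∀ j, j ≤ k → (stB.1.1 ++ [stB.2.1]).getD j 0 = stB.1.1.getD j 0 :=
          fun j hj => List.getD_append _ _ _ _ (by omega)
        have hg2 : (stB.1.1 ++ [stB.2.1]).getD (k + 1) 0 = stB.2.1 := by
          rw [List.getD_append_right _ _ _ _ (by omega), P3, Nat.sub_self]; rfl
        rcases Nat.lt_or_ge j2 (k + 1) with h | h
        · rw [hg j1 (by omega), hg j2 (by omega)]; exact P4 j1 j2 h12 (by omega)
        · have hj2 : j2 = k + 1 := by omega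
          rcases Nat.lt_or_ge j1 (k + 1) with h' | h'
          · rw [hg j1 (by omega), hj2, hg2]; exact hble j1 (by omega)
          · have he : j1 = k + 1 := by omega
            rw [he, hj2]
      · rw [List.getD_append_right _ _ _ _ (by omega), P3, Nat.sub_self]; rfl
      · rw [List.getD_append _ _ _ _ (by omega)]; exact Pt1
      · intro j hj
        rw [List.getD_append _ _ _ _ (by omega)]
        exact Pt3 j hj

-- ===== VERDICT (by name: the statement is the Claim_ definition above) =====
theorem dp_activity_selector_spec : Claim_equal_dp_activity_selector := by
  intro S F _ hPre
  unfold Spec_dp_activity_selector dp_activity_selector dp_activity_selector_alt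
  cases hp : PySem.List.sorted (List.zip S F) (fun e => e.2) with
  | nil =>
    rw [PySem.List.sorted_eq_nil_iff] at hp
    rcases List.zip_eq_nil_iff.mp hp with h | h
    · exact absurd h hPre.1
    · exact absurd h hPre.2
  | cons hd rest =>
    obtain ⟨s0, f0⟩ := hd
    have hF : ∀ p q : Nat, p ≤ q → q < rest.length + 1 →
        (((s0, f0) :: rest).map Prod.snd).getD p 0 ≤ (((s0, f0) :: rest).map Prod.snd).getD q 0 := by
      intro p q hpq hq
      have hlen : q < (PySem.List.sorted (List.zip S F) (fun e => e.2)).length := by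
        rw [hp]; simpa using hq
      have h := PySem.List.key_sorted_getElem_mono (List.zip S F) (fun e => e.2) hpq hlen
      simp only [hp] at h
      have hp2 : p < (((s0, f0) :: rest).map Prod.snd).length := by simp; omega
      have hq2 : q < (((s0, f0) :: rest).map Prod.snd).length := by simpa using hq
      rw [List.getD_eq_getElem _ _ hp2, List.getD_eq_getElem _ _ hq2]
      simp only [List.getElem_map]
      exact h
    have inv := pv_invariant s0 f0 rest hF rest.length (le_refl _)
    obtain ⟨h1, h2, -⟩ := inv
    simp only [List.take_length, Nat.sub_self, List.replicate, List.append_nil] at h1 h2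
    rw [Prod.ext_iff]
    constructor
    · simpa using h1
    · simpa using h2
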